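-- pv_equiv track=rewrite | github.com/Judongsung/algorithm | 프로그래머스/2/148653. 마법의 엘리베이터/마법의 엘리베이터.py | solution
-- ===== SOURCE A (Python) =====
-- def solution(storey):
--     count = 0
--     num = storey
--
--     while num:
--         num, mod = divmod(num, 10)
--         if mod < 5:
--             count += mod
--         elif mod == 5:
--             count += mod
--             if num%10 >= 5:
--                 num += 1
--
--         else:
--             count += 10-mod
--             num += 1
--
--     return count
-- ===== SOURCE B (Python) =====
-- def solution(storey):
--     # digit DP: cheapest way to clear the remaining prefix n, choosing per
--     # digit to press down (d) or up (10-d, with carry) and taking the min.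
--     def f(n):
--         if n < 10:
--             return min(n, 11 - n)
--         q, d = divmod(n, 10)
--         return min(d + f(q), (10 - d) + f(q + 1))
--     return f(storey)
-- ===== Notes on version B (the rewrite author's own statement) =====
-- stated objective: alternative
-- what changed: Replaces A's greedy forward digit pass with an explicit mid-digit carry lookahead by a recursive digit DP that takes the min of press-down and press-up-with-carry at each digit.
-- outside the precondition, e.g. on solution(-1): A returns 1, B returns -1
import Mathlib
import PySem

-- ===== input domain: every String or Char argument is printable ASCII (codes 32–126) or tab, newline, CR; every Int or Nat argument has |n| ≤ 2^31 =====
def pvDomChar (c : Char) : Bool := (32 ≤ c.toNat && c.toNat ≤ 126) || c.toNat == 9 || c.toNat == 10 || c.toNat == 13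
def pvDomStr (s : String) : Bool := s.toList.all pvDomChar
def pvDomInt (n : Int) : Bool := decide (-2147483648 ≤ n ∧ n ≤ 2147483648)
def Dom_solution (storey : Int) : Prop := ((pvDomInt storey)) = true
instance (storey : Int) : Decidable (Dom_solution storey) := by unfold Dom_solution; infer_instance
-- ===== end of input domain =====

-- B replaces A's greedy digit pass (with explicit mid-digit carry lookahead) by a recursive
-- min-over-two-choices digit DP; objective: alternative (not faster).

-- ===== PORT A =====
-- while-loop ported with fuel; fuel storey.natAbs + 1 is enough because |num|
-- strictly decreases every iteration (the 0-fuel exit only makes the port total).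
def solutionLoop (fuel : Nat) (num count : Int) : Int :=
  match fuel with
  | 0 => count
  | f + 1 =>
    if num = 0 then count
    else
      let q := PySem.Int.floordiv num 10
      let m := PySem.Int.mod num 10
      if m < 5 then solutionLoop f q (count + m)
      else if m = 5 then
        solutionLoop f (if 5 ≤ PySem.Int.mod q 10 then q + 1 else q) (count + m)
      else solutionLoop f (q + 1) (count + (10 - m))

def solution (storey : Int) : Int := solutionLoop (storey.natAbs + 1) storey 0

-- ===== PORT B =====
def altF (n : Int) : Int :=
  if n < 10 then min n (11 - n)
  else
    let q := PySem.Int.floordiv n 10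
    let d := PySem.Int.mod n 10
    min (d + altF q) ((10 - d) + altF (q + 1))
termination_by n.natAbs
decreasing_by
  all_goals
    rw [PySem.Int.floordiv_eq_ediv_of_pos (by norm_num)]
    omega

def solution_alt (storey : Int) : Int := altF storey

-- ===== PRECONDITION & SPEC =====
-- Pre_ restricts to the task's natural domain (elevator floors are nonnegative);
-- A also returns a value on negative inputs, but those are outside the problem's domain
-- and B's recursion bottoms out differently there.
def Pre_solution (storey : Int) : Prop := 0 ≤ storey
instance (storey : Int) : Decidable (Pre_solution storey) := by unfold Pre_solution; infer_instance
def pvWitness_solution : Int := 2554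

def Spec_solution (storey : Int) (out : Int) : Prop := out = solution_alt storey
instance (storey : Int) (out : Int) : Decidable (Spec_solution storey out) := by unfold Spec_solution; infer_instance

-- ===== CLAIM (what is proved, stated in full; the proofs are below) =====
def Claim_equal_solution : Prop := ∀ (storey : Int), Dom_solution storey → Pre_solution storey → Spec_solution storey (solution storey)

-- ===== LEMMAS AND PROOFS =====

lemma altF_eq (n : Int) : altF n =
    if n < 10 then min n (11 - n)
    else min (n % 10 + altF (n / 10)) ((10 - n % 10) + altF (n / 10 + 1)) := by
  rw [altF]
  rw [PySem.Int.floordiv_eq_ediv_of_pos (by norm_num), PySem.Int.mod_eq_emod_of_pos (by norm_num)]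

-- neighbor facts about B's cost function, by strong induction on |n|
lemma altF_neighbor : ∀ k : Nat, ∀ n : Int, n.natAbs = k → 0 ≤ n →
    (altF n ≤ altF (n + 1) + 1 ∧ altF (n + 1) ≤ altF n + 1 ∧
     (5 ≤ n % 10 → altF (n + 1) ≤ altF n) ∧ (n % 10 < 5 → altF n ≤ altF (n + 1))) := by
  intro k
  induction k using Nat.strong_induction_on with
  | _ k ih =>
    intro n hk hn
    by_cases hlt : n < 9
    · -- both n and n+1 single digit
      rw [altF_eq, altF_eq (n + 1)]
      rw [if_pos (by omega), if_pos (by omega)]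
      omega
    · by_cases h9 : n = 9
      · subst h9
        have hA1 : altF 1 = 1 := by rw [altF_eq 1]; norm_num
        have hA2 : altF 2 = 2 := by rw [altF_eq 2]; norm_num
        have hA9 : altF 9 = 2 := by rw [altF_eq 9]; norm_num
        have hA10 : altF 10 = 1 := by
          rw [altF_eq 10]; norm_num [hA1, hA2]
        have h910 : (9:Int) + 1 = 10 := by norm_num
        rw [h910, hA9, hA10]
        norm_num
      · -- n ≥ 10
        have hn10 : 10 ≤ n := by omega
        have hq1 : 1 ≤ n / 10 := by omega
        have ihq := ih (n / 10).natAbs (by omega) (n / 10) rfl (by omega)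
        by_cases hd : n % 10 ≤ 8
        · have h1 : (n + 1) / 10 = n / 10 := by omega
          have h2 : (n + 1) % 10 = n % 10 + 1 := by omega
          rw [altF_eq, altF_eq (n + 1), if_neg (by omega), if_neg (by omega), h1, h2]
          omega
        · -- n % 10 = 9 : carry in n+1
          have h1 : (n + 1) / 10 = n / 10 + 1 := by omega
          have h2 : (n + 1) % 10 = 0 := by omega
          have ihq1 := ih (n / 10 + 1).natAbs (by omega) (n / 10 + 1) rfl (by omega)
          rw [altF_eq, altF_eq (n + 1), if_neg (by omega), if_neg (by omega), h1, h2]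
          omega

lemma loop_eq : ∀ fuel : Nat, ∀ n count : Int, 0 ≤ n → n.natAbs < fuel →
    solutionLoop fuel n count = count + altF n := by
  intro fuel
  induction fuel with
  | zero => intro n c _ h; omega
  | succ f ih =>
    intro n c hn hf
    by_cases h0 : n = 0
    · subst h0
      simp only [solutionLoop]
      rw [altF_eq]; norm_num
    · have hn1 : 1 ≤ n := by omega
      simp only [solutionLoop, if_neg h0]
      rw [PySem.Int.floordiv_eq_ediv_of_pos (by norm_num),
          PySem.Int.mod_eq_emod_of_pos (by norm_num),
          PySem.Int.mod_eq_emod_of_pos (by norm_num)]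
      have hqn : (n / 10).natAbs < f := by omega
      have hq0 : (0:Int) ≤ n / 10 := by omega
      obtain ⟨hL1, hL2, hL3, hL4⟩ := altF_neighbor (n / 10).natAbs (n / 10) rfl hq0
      have hA0 : altF 0 = 0 := by rw [altF_eq 0]; norm_num
      have hA1 : altF 1 = 1 := by rw [altF_eq 1]; norm_num
      split_ifs with hm1 hm2 hm3
      · -- n % 10 < 5
        rw [ih (n / 10) (c + n % 10) hq0 hqn, altF_eq n]
        by_cases hs : n < 10
        · have h0' : n / 10 = 0 := by omega
          rw [if_pos hs, h0', hA0]; omega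
        · rw [if_neg (by omega)]; omega
      · -- n % 10 = 5, carry (n / 10 % 10 ≥ 5, so n ≥ 55)
        have hbig : 55 ≤ n := by omega
        have hc := hL3 hm3
        rw [ih (n / 10 + 1) (c + n % 10) (by omega) (by omega), altF_eq n,
            if_neg (by omega)]
        omega
      · -- n % 10 = 5, no carry
        rw [ih (n / 10) (c + n % 10) hq0 hqn]
        by_cases hs : n < 10
        · have hn5 : n = 5 := by omega
          subst hn5
          have hA5 : altF 5 = 5 := by rw [altF_eq 5]; norm_num
          have h0' : (5:Int) / 10 = 0 := by norm_num
          rw [h0', hA0, hA5]; norm_num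
        · have hc := hL4 (by omega)
          rw [altF_eq n, if_neg (by omega)]; omega
      · -- n % 10 ≥ 6
        have hm6 : 6 ≤ n % 10 := by omega
        rw [ih (n / 10 + 1) (c + (10 - n % 10)) (by omega) (by omega), altF_eq n]
        by_cases hs : n < 10
        · have h1' : n / 10 + 1 = 1 := by omega
          rw [if_pos hs, h1', hA1]; omega
        · rw [if_neg (by omega)]; omega

-- ===== VERDICT (by name: the statement is the Claim_ definition above) =====
theorem solution_spec : Claim_equal_solution := by
  intro storey _ hpre
  unfold Spec_solution solution solution_alt
  rw [loop_eq (storey.natAbs + 1) storey 0 hpre (by omega)]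
  omega
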